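-- pv_equiv track=rewrite | github.com/mmh132/ProjectEuler | work/P401.py | SIGMA2
-- ===== SOURCE A (Python) =====
-- from math import sqrt
--
-- def F(x):
--     return x*(x+1)*(2*x+1)//6
--
-- def G(x):
--     return x
--
-- def f(x):
--     return x*x
--
-- def g(x):
--     return 1
--
-- def SIGMA2(x):
--     A = int(sqrt(x))
--     B = int(sqrt(x))
--     s = -F(A)*G(B)
--     for a in range(1, A+1):
--         s += f(a)*G(x//a)
--     for b in range(1, B+1):
--         s += g(b)*F(x//b)
--     return s
-- ===== SOURCE B (Python) =====
-- def F(x):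
--     return x * (x + 1) * (2 * x + 1) // 6
--
-- def SIGMA2(x):
--     # quotient-grouping: sum q * (F(j) - F(i-1)) over blocks of equal q = x // i
--     s = 0
--     i = 1
--     while i <= x:
--         q = x // i
--         j = x // q
--         s += q * (F(j) - F(i - 1))
--         i = j + 1
--     return s
-- ===== Notes on version B (the rewrite author's own statement) =====
-- stated objective: alternative
-- what changed: Replaces A's Dirichlet-hyperbola method (two isqrt(x)-bounded loops plus a -F(A)*A correction term) by a single quotient-grouping while-loop that walks blocks of equal q = x//i and adds q*(F(j)-F(i-1)) per block, using only the closed form F.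
import Mathlib
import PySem

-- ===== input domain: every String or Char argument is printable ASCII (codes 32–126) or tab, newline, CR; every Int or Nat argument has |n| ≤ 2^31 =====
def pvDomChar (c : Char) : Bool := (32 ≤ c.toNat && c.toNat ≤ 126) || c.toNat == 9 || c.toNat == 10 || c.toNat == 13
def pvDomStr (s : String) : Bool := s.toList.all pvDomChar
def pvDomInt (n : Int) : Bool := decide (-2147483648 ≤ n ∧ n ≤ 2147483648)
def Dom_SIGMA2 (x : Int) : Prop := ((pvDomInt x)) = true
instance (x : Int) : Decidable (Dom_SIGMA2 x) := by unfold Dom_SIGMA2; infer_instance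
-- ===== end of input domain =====

-- B replaces A's Dirichlet-hyperbola split (two sqrt-bounded loops plus a correction term) by a
-- single quotient-grouping loop over blocks of equal x // i; objective: alternative (similar cost).

-- ===== PORT A =====
-- A's helpers F, G, f, g
def aF (x : Int) : Int := PySem.Int.floordiv (x * (x + 1) * (2 * x + 1)) 6
def aG (x : Int) : Int := x
def af (x : Int) : Int := x * x
def ag (_x : Int) : Int := (1 : Int)

-- `int(math.sqrt x)` is ported as `Int.sqrt` (integer square root): for 0 ≤ x ≤ 2^31 (Pre_ ∩ Dom)
-- the correctly rounded float sqrt satisfies int(sqrt(x)) = isqrt(x); for x < 0 Python raises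
-- ValueError (excluded by Pre_).
def SIGMA2 (x : Int) : Int :=
  let A : Int := Int.sqrt x
  let B : Int := Int.sqrt x
  let s : Int := -aF A * aG B
  let s := (PySem.List.pyRange 1 (A + 1) 1).foldl
    (fun s a => s + af a * aG (PySem.Int.floordiv x a)) s
  (PySem.List.pyRange 1 (B + 1) 1).foldl
    (fun s b => s + ag b * aF (PySem.Int.floordiv x b)) s

-- ===== PORT B =====
def bF (x : Int) : Int := PySem.Int.floordiv (x * (x + 1) * (2 * x + 1)) 6

-- bounds on q = x // i and j = x // q, used for the while-loop's termination
theorem pvBlockBounds (x i : Int) (hi : 1 ≤ i) (hx : i ≤ x) :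
    1 ≤ PySem.Int.floordiv x i ∧
    i ≤ PySem.Int.floordiv x (PySem.Int.floordiv x i) ∧
    PySem.Int.floordiv x (PySem.Int.floordiv x i) ≤ x := by
  have hx0 : (0 : Int) ≤ x := by omega
  rw [PySem.Int.floordiv_eq_ediv_of_pos (by omega : (0:Int) < i)]
  have h1 : 1 ≤ x / i := by rw [Int.le_ediv_iff_mul_le (by omega)]; omega
  rw [PySem.Int.floordiv_eq_ediv_of_pos (by omega : (0:Int) < x / i)]
  refine ⟨h1, ?_, Int.ediv_le_self _ hx0⟩
  rw [Int.le_ediv_iff_mul_le (by omega)]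
  calc i * (x / i) = x / i * i := mul_comm _ _
    _ ≤ x := Int.ediv_mul_le x (by omega)

-- the while-loop of B: state (i, s), step q = x // i, j = x // q, s += q*(F(j)-F(i-1)), i = j+1;
-- `hi` records the loop invariant 1 ≤ i needed for termination
def SIGMA2Go (x i s : Int) (hi : 1 ≤ i) : Int :=
  if hx : i ≤ x then
    SIGMA2Go x (PySem.Int.floordiv x (PySem.Int.floordiv x i) + 1)
      (s + PySem.Int.floordiv x i *
        (bF (PySem.Int.floordiv x (PySem.Int.floordiv x i)) - bF (i - 1)))
      (by have h := pvBlockBounds x i hi hx; omega)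
  else s
termination_by (x + 1 - i).toNat
decreasing_by
  have h := pvBlockBounds x i hi hx
  omega

def SIGMA2_alt (x : Int) : Int := SIGMA2Go x 1 0 le_rfl

-- ===== PRECONDITION & SPEC =====
-- Pre_ excludes exactly x < 0, where Python's math.sqrt raises ValueError (A returns on all x ≥ 0).
def Pre_SIGMA2 (x : Int) : Prop := 0 ≤ x
instance (x : Int) : Decidable (Pre_SIGMA2 x) := by unfold Pre_SIGMA2; infer_instance
def pvWitness_SIGMA2 : Int := 10


def Spec_SIGMA2 (x : Int) (out : Int) : Prop := out = SIGMA2_alt x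
instance (x : Int) (out : Int) : Decidable (Spec_SIGMA2 x out) := by unfold Spec_SIGMA2; infer_instance

-- ===== CLAIM (what is proved, stated in full; the proofs are below) =====
def Claim_equal_SIGMA2 : Prop := ∀ (x : Int), Dom_SIGMA2 x → Pre_SIGMA2 x → Spec_SIGMA2 x (SIGMA2 x)
-- ===== LEMMAS AND PROOFS =====

-- the canonical quantity both programs compute: ∑_{a=1}^{x} a² * (x // a)
noncomputable def Tsum (x : Int) : Int := ∑ a ∈ Finset.Icc (1:ℤ) x, a ^ 2 * (x / a)
-- partial sums of squares
noncomputable def Fsum (n : Int) : Int := ∑ a ∈ Finset.Icc (1:ℤ) n, a ^ 2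

theorem sum_Icc_succ_top_int (a b : Int) (h : a ≤ b + 1) (f : Int → Int) :
    ∑ k ∈ Finset.Icc a (b + 1), f k = (∑ k ∈ Finset.Icc a b, f k) + f (b + 1) := by
  have hins : Finset.Icc a (b + 1) = insert (b + 1) (Finset.Icc a b) := by
    ext k; simp only [Finset.mem_Icc, Finset.mem_insert]; omega
  rw [hins, Finset.sum_insert (by simp [Finset.mem_Icc])]
  ring

theorem sum_Icc_split (i j x : Int) (h1 : i ≤ j + 1) (h2 : j ≤ x) (f : Int → Int) :
    ∑ k ∈ Finset.Icc i x, f k =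
      (∑ k ∈ Finset.Icc i j, f k) + ∑ k ∈ Finset.Icc (j + 1) x, f k := by
  rw [← Finset.sum_union]
  · congr 1; ext k; simp only [Finset.mem_Icc, Finset.mem_union]; omega
  · rw [Finset.disjoint_left]; intro k hk hk'
    simp only [Finset.mem_Icc] at hk hk'; omega

theorem six_mul_Fsum (n : Int) (hn : 0 ≤ n) : 6 * Fsum n = n * (n + 1) * (2 * n + 1) := by
  induction n, hn using Int.le_induction with
  | base => simp [Fsum]
  | succ n hn ih =>
      unfold Fsum at *
      rw [sum_Icc_succ_top_int 1 n (by omega)]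
      ring_nf
      ring_nf at ih
      linarith

theorem bF_eq_Fsum (n : Int) (hn : 0 ≤ n) : bF n = Fsum n := by
  unfold bF
  rw [PySem.Int.floordiv_eq_ediv_of_pos (by norm_num), ← six_mul_Fsum n hn]
  exact Int.mul_ediv_cancel_left _ (by norm_num)

theorem sqrt_facts (x : Int) (hx : 0 ≤ x) :
    0 ≤ Int.sqrt x ∧ Int.sqrt x * Int.sqrt x ≤ x ∧ x < (Int.sqrt x + 1) * (Int.sqrt x + 1) ∧
    Int.sqrt x ≤ x := by
  refine ⟨Int.sqrt_nonneg x, ?_, ?_, ?_⟩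
  · rw [Int.sqrt]
    have h : x.toNat.sqrt * x.toNat.sqrt ≤ x.toNat := by
      have h0 := Nat.sqrt_le' x.toNat
      nlinarith [h0]
    have hx' : ((x.toNat : Int)) = x := Int.toNat_of_nonneg hx
    calc ((x.toNat.sqrt : Int)) * (x.toNat.sqrt : Int)
        = ((x.toNat.sqrt * x.toNat.sqrt : ℕ) : Int) := by push_cast; ring
      _ ≤ ((x.toNat : ℕ) : Int) := by exact_mod_cast h
      _ = x := hx'
  · rw [Int.sqrt]
    have h : x.toNat < (x.toNat.sqrt + 1) * (x.toNat.sqrt + 1) := by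
      have h0 := Nat.lt_succ_sqrt' x.toNat
      nlinarith [h0]
    have hx' : ((x.toNat : Int)) = x := Int.toNat_of_nonneg hx
    calc x = ((x.toNat : ℕ) : Int) := hx'.symm
      _ < (((x.toNat.sqrt + 1) * (x.toNat.sqrt + 1) : ℕ) : Int) := by exact_mod_cast h
      _ = ((x.toNat.sqrt : Int) + 1) * ((x.toNat.sqrt : Int) + 1) := by push_cast; ring
  · rw [Int.sqrt]
    have h := Nat.sqrt_le_self x.toNat
    have hx' : ((x.toNat : Int)) = x := Int.toNat_of_nonneg hx
    push_cast
    omega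

-- x // a as an indicator sum over Icc 1 x
theorem ediv_eq_indicator_sum (x a : Int) (hx : 0 ≤ x) (ha : 1 ≤ a) :
    x / a = ∑ b ∈ Finset.Icc (1:ℤ) x, (if a * b ≤ x then (1:ℤ) else 0) := by
  rw [← Finset.sum_filter]
  have hq0 : 0 ≤ x / a := Int.ediv_nonneg hx (by omega)
  have hfil : (Finset.Icc (1:ℤ) x).filter (fun b => a * b ≤ x) = Finset.Icc 1 (x / a) := by
    ext b
    simp only [Finset.mem_filter, Finset.mem_Icc]
    constructor
    · rintro ⟨⟨h1, _⟩, h3⟩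
      exact ⟨h1, by rw [Int.le_ediv_iff_mul_le (by omega)]; linarith [mul_comm a b]⟩
    · rintro ⟨h1, h2⟩
      have hba : b * a ≤ x := (Int.le_ediv_iff_mul_le (by omega)).1 h2
      have hbb : b * 1 ≤ b * a := by
        apply mul_le_mul_of_nonneg_left ha (by omega)
      refine ⟨⟨h1, by omega⟩, by linarith [mul_comm b a]⟩
  rw [hfil, Finset.sum_const, Int.card_Icc, nsmul_eq_mul, mul_one,
    Int.toNat_of_nonneg (by linarith : (0:ℤ) ≤ x / a + 1 - 1)]
  ring

-- Fsum m as an indicator sum over Icc 1 x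
theorem Fsum_eq_indicator_sum (x m : Int) (hm : 0 ≤ m) (hmx : m ≤ x) :
    Fsum m = ∑ a ∈ Finset.Icc (1:ℤ) x, (if a ≤ m then a ^ 2 else 0) := by
  unfold Fsum
  rw [← Finset.sum_filter]
  congr 1
  ext a
  simp only [Finset.mem_filter, Finset.mem_Icc]
  omega

-- restrict an Icc 1 A sum to an `if` inside an Icc 1 x sum
theorem sum_Icc_restrict (A x : Int) (hA : A ≤ x) (g : Int → Int) :
    ∑ a ∈ Finset.Icc (1:ℤ) A, g a = ∑ a ∈ Finset.Icc (1:ℤ) x, (if a ≤ A then g a else 0) := by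
  rw [← Finset.sum_filter]
  congr 1
  ext a
  simp only [Finset.mem_filter, Finset.mem_Icc]
  omega

-- list-sum over range(1, n+1) is the Finset sum over Icc 1 n
theorem pyRange_sum (n : Int) (hn : 0 ≤ n) (f : Int → Int) :
    ((PySem.List.pyRange 1 (n + 1) 1).map f).sum = ∑ a ∈ Finset.Icc (1:ℤ) n, f a := by
  induction n, hn using Int.le_induction with
  | base =>
      rw [PySem.List.pyRange_one_eq_nil (by omega)]
      simp [Finset.Icc_eq_empty (by omega : ¬ (1:ℤ) ≤ 0)]
  | succ n hn ih =>
      rw [PySem.List.pyRange_one_succ_right (by omega), List.map_append, List.sum_append,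
        ih, sum_Icc_succ_top_int 1 n (by omega)]
      simp

-- the Dirichlet hyperbola identity instantiated to f(a) = a², g = 1
theorem hyperbola (x : Int) (hx : 0 ≤ x) :
    -Fsum (Int.sqrt x) * Int.sqrt x
      + (∑ a ∈ Finset.Icc (1:ℤ) (Int.sqrt x), a ^ 2 * (x / a))
      + (∑ b ∈ Finset.Icc (1:ℤ) (Int.sqrt x), Fsum (x / b)) = Tsum x := by
  obtain ⟨hA0, hAle, hAlt, hAx⟩ := sqrt_facts x hx
  set A := Int.sqrt x with hA
  have hS1 : (∑ a ∈ Finset.Icc (1:ℤ) A, a ^ 2 * (x / a))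
      = ∑ a ∈ Finset.Icc (1:ℤ) x, ∑ b ∈ Finset.Icc (1:ℤ) x,
          (if a ≤ A ∧ a * b ≤ x then a ^ 2 else 0) := by
    rw [sum_Icc_restrict A x hAx]
    apply Finset.sum_congr rfl
    intro a ha
    simp only [Finset.mem_Icc] at ha
    by_cases h : a ≤ A
    · simp only [h, if_true, true_and]
      rw [ediv_eq_indicator_sum x a hx ha.1, Finset.mul_sum]
      apply Finset.sum_congr rfl
      intro b _
      by_cases h2 : a * b ≤ x <;> simp only [h2, if_true, if_false, mul_one, mul_zero]
    · simp only [h, if_false, false_and]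
      rw [eq_comm, Finset.sum_eq_zero]
      intro b _; simp
  have hS2 : (∑ b ∈ Finset.Icc (1:ℤ) A, Fsum (x / b))
      = ∑ a ∈ Finset.Icc (1:ℤ) x, ∑ b ∈ Finset.Icc (1:ℤ) x,
          (if b ≤ A ∧ a * b ≤ x then a ^ 2 else 0) := by
    rw [Finset.sum_comm, sum_Icc_restrict A x hAx]
    apply Finset.sum_congr rfl
    intro b hb
    simp only [Finset.mem_Icc] at hb
    by_cases h : b ≤ A
    · simp only [h, if_true, true_and]
      rw [Fsum_eq_indicator_sum x (x / b) (Int.ediv_nonneg hx (by omega))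
        (Int.ediv_le_self _ hx)]
      apply Finset.sum_congr rfl
      intro a _
      have hiff : a ≤ x / b ↔ a * b ≤ x := Int.le_ediv_iff_mul_le (by omega)
      rw [if_congr hiff rfl rfl]
    · simp only [h, if_false, false_and]
      rw [eq_comm, Finset.sum_eq_zero]
      intro a _; simp
  have hT : Tsum x = ∑ a ∈ Finset.Icc (1:ℤ) x, ∑ b ∈ Finset.Icc (1:ℤ) x,
      (if a * b ≤ x then a ^ 2 else 0) := by
    unfold Tsum
    apply Finset.sum_congr rfl
    intro a ha
    simp only [Finset.mem_Icc] at ha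
    rw [ediv_eq_indicator_sum x a hx ha.1, Finset.mul_sum]
    apply Finset.sum_congr rfl
    intro b _
    by_cases h2 : a * b ≤ x <;> simp [h2]
  have hcard : ∀ c : Int, (∑ _b ∈ Finset.Icc (1:ℤ) A, c) = A * c := by
    intro c
    rw [Finset.sum_const, Int.card_Icc, nsmul_eq_mul]
    have h1 : A + 1 - 1 = A := by ring
    rw [h1, Int.toNat_of_nonneg hA0]
  have hO : (∑ a ∈ Finset.Icc (1:ℤ) x, ∑ b ∈ Finset.Icc (1:ℤ) x,
      (if a ≤ A ∧ b ≤ A then a ^ 2 else 0)) = A * Fsum A := by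
    calc (∑ a ∈ Finset.Icc (1:ℤ) x, ∑ b ∈ Finset.Icc (1:ℤ) x,
          (if a ≤ A ∧ b ≤ A then a ^ 2 else 0))
        = ∑ a ∈ Finset.Icc (1:ℤ) x,
            (if a ≤ A then ∑ b ∈ Finset.Icc (1:ℤ) x, (if b ≤ A then a ^ 2 else 0) else 0) := by
          apply Finset.sum_congr rfl
          intro a _
          by_cases h1 : a ≤ A
          · simp only [h1, true_and, if_true]
          · simp only [h1, false_and, if_false]
            exact Finset.sum_eq_zero fun b _ => rfl
      _ = ∑ a ∈ Finset.Icc (1:ℤ) A, ∑ b ∈ Finset.Icc (1:ℤ) A, a ^ 2 := by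
          rw [← sum_Icc_restrict A x hAx]
          apply Finset.sum_congr rfl
          intro a _
          rw [← sum_Icc_restrict A x hAx]
      _ = ∑ a ∈ Finset.Icc (1:ℤ) A, A * a ^ 2 := by
          apply Finset.sum_congr rfl
          intro a _
          exact hcard _
      _ = A * Fsum A := by unfold Fsum; rw [← Finset.mul_sum]
  have key : (∑ a ∈ Finset.Icc (1:ℤ) x, ∑ b ∈ Finset.Icc (1:ℤ) x,
        (if a ≤ A ∧ a * b ≤ x then a ^ 2 else 0))
      + (∑ a ∈ Finset.Icc (1:ℤ) x, ∑ b ∈ Finset.Icc (1:ℤ) x,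
        (if b ≤ A ∧ a * b ≤ x then a ^ 2 else 0))
      = (∑ a ∈ Finset.Icc (1:ℤ) x, ∑ b ∈ Finset.Icc (1:ℤ) x,
        (if a * b ≤ x then a ^ 2 else 0))
      + (∑ a ∈ Finset.Icc (1:ℤ) x, ∑ b ∈ Finset.Icc (1:ℤ) x,
        (if a ≤ A ∧ b ≤ A then a ^ 2 else 0)) := by
    rw [← Finset.sum_add_distrib, ← Finset.sum_add_distrib]
    apply Finset.sum_congr rfl
    intro a ha
    rw [← Finset.sum_add_distrib, ← Finset.sum_add_distrib]
    apply Finset.sum_congr rfl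
    intro b hb
    simp only [Finset.mem_Icc] at ha hb
    have hf1 : a ≤ A → b ≤ A → a * b ≤ x := by
      intro h1 h2
      have hm : a * b ≤ A * A := mul_le_mul h1 h2 (by omega) hA0
      linarith
    have hf2 : a * b ≤ x → a ≤ A ∨ b ≤ A := by
      intro h3
      by_cases h : a ≤ A
      · exact Or.inl h
      by_cases h' : b ≤ A
      · exact Or.inr h'
      exfalso
      have hc1 : A < a := by omega
      have hc2 : A < b := by omega
      have hm : (A + 1) * (A + 1) ≤ a * b := mul_le_mul (by omega) (by omega) (by omega) (by omega)
      linarith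
    by_cases h1 : a ≤ A <;> by_cases h2 : b ≤ A <;> by_cases h3 : a * b ≤ x
    · simp only [h1, h2, h3, and_self, if_true]
    · exact absurd (hf1 h1 h2) h3
    · simp only [h1, h2, h3, and_true, and_false, true_and, if_true, if_false, add_zero]
    · simp only [h1, h2, h3, and_true, and_false, true_and, if_true, if_false, add_zero]
    · simp only [h1, h2, h3, and_true, and_false, false_and, true_and, if_true, if_false,
        add_zero, zero_add]
    · simp only [h1, h2, h3, and_true, and_false, false_and, true_and, if_true, if_false,
        add_zero]
    · exact (hf2 h3).elim (fun h => absurd h h1) (fun h => absurd h h2)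
    · simp only [h1, h2, h3, and_false, false_and, if_true, if_false, add_zero]
  rw [hS1, hS2, hT]
  linarith [key, hO]

theorem A_eq_Tsum (x : Int) (hx : 0 ≤ x) : SIGMA2 x = Tsum x := by
  obtain ⟨hA0, hAle, hAlt, hAx⟩ := sqrt_facts x hx
  have haF : ∀ (m : Int), 0 ≤ m → aF m = Fsum m := bF_eq_Fsum
  unfold SIGMA2
  dsimp only
  rw [PySem.List.foldl_add, PySem.List.foldl_add, pyRange_sum _ hA0, pyRange_sum _ hA0]
  have e1 : (∑ a ∈ Finset.Icc (1:ℤ) (Int.sqrt x), af a * aG (PySem.Int.floordiv x a))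
      = ∑ a ∈ Finset.Icc (1:ℤ) (Int.sqrt x), a ^ 2 * (x / a) := by
    apply Finset.sum_congr rfl
    intro a ha
    simp only [Finset.mem_Icc] at ha
    rw [af, aG, PySem.Int.floordiv_eq_ediv_of_pos (by omega)]
    ring
  have e2 : (∑ b ∈ Finset.Icc (1:ℤ) (Int.sqrt x), ag b * aF (PySem.Int.floordiv x b))
      = ∑ b ∈ Finset.Icc (1:ℤ) (Int.sqrt x), Fsum (x / b) := by
    apply Finset.sum_congr rfl
    intro b hb
    simp only [Finset.mem_Icc] at hb
    rw [ag, PySem.Int.floordiv_eq_ediv_of_pos (by omega),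
      haF _ (Int.ediv_nonneg hx (by omega))]
    ring
  rw [e1, e2, aG, haF _ hA0]
  have := hyperbola x hx
  linarith [this]

theorem go_spec : ∀ (n : ℕ) (x i s : Int) (hi : 1 ≤ i), 0 ≤ x → (x + 1 - i).toNat = n →
    SIGMA2Go x i s hi = s + ∑ a ∈ Finset.Icc i x, a ^ 2 * (x / a) := by
  intro n
  induction n using Nat.strong_induction_on with
  | _ n ih =>
    intro x i s hi hx hn
    rw [SIGMA2Go]
    by_cases hle : i ≤ x
    · rw [dif_pos hle]
      obtain ⟨hq1, hij, hjx⟩ := pvBlockBounds x i hi hle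
      have hqe : PySem.Int.floordiv x i = x / i :=
        PySem.Int.floordiv_eq_ediv_of_pos (by omega)
      have hje : PySem.Int.floordiv x (PySem.Int.floordiv x i) = x / (x / i) := by
        rw [hqe]; exact PySem.Int.floordiv_eq_ediv_of_pos (by omega)
      rw [ih (x + 1 - (PySem.Int.floordiv x (PySem.Int.floordiv x i) + 1)).toNat
        (by omega) x _ _ (by have h := pvBlockBounds x i hi hle; omega) hx rfl]
      rw [sum_Icc_split i (PySem.Int.floordiv x (PySem.Int.floordiv x i)) x
        (by omega) (by omega)]
      have hblk : PySem.Int.floordiv x i *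
          (bF (PySem.Int.floordiv x (PySem.Int.floordiv x i)) - bF (i - 1)) =
          ∑ a ∈ Finset.Icc i (PySem.Int.floordiv x (PySem.Int.floordiv x i)),
            a ^ 2 * (x / a) := by
        have hFsplit : Fsum (PySem.Int.floordiv x (PySem.Int.floordiv x i)) =
            Fsum (i - 1) + ∑ a ∈ Finset.Icc i (PySem.Int.floordiv x (PySem.Int.floordiv x i)),
              a ^ 2 := by
          unfold Fsum
          rw [sum_Icc_split 1 (i - 1) (PySem.Int.floordiv x (PySem.Int.floordiv x i))
            (by omega) (by omega)]
          have h1 : i - 1 + 1 = i := by ring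
          rw [h1]
        have hconst : ∀ a ∈ Finset.Icc i (PySem.Int.floordiv x (PySem.Int.floordiv x i)),
            x / a = x / i := by
          intro a ha
          simp only [Finset.mem_Icc] at ha
          have ha1 : 1 ≤ a := by omega
          have hq1' : 1 ≤ x / i := by omega
          apply le_antisymm
          · by_cases hfin : x / a ≤ x / i
            · exact hfin
            exfalso
            have hcon : x / i < x / a := by omega
            have h1 : (x / i + 1) * a ≤ x := by
              have h0 := (Int.le_ediv_iff_mul_le (show (0:ℤ) < a by omega)).1
                (by omega : x / i + 1 ≤ x / a)
              linarith
            have h2 : (x / i + 1) * i ≤ (x / i + 1) * a :=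
              mul_le_mul_of_nonneg_left (by omega) (by linarith)
            have h3 : x / i + 1 ≤ x / i :=
              (Int.le_ediv_iff_mul_le (show (0:ℤ) < i by omega)).2 (by linarith)
            omega

          · have haj : a ≤ x / (x / i) := by rw [← hje]; exact ha.2
            have h1 : a * (x / i) ≤ x :=
              (Int.le_ediv_iff_mul_le (by omega : (0:ℤ) < x / i)).1 haj
            exact (Int.le_ediv_iff_mul_le (show (0:ℤ) < a by omega)).2
              (by linarith [mul_comm a (x / i)])
        calc PySem.Int.floordiv x i *
            (bF (PySem.Int.floordiv x (PySem.Int.floordiv x i)) - bF (i - 1))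
            = PySem.Int.floordiv x i *
              (∑ a ∈ Finset.Icc i (PySem.Int.floordiv x (PySem.Int.floordiv x i)),
                a ^ 2) := by
              rw [bF_eq_Fsum (PySem.Int.floordiv x (PySem.Int.floordiv x i)) (by omega),
                bF_eq_Fsum (i - 1) (by omega), hFsplit]
              ring
          _ = ∑ a ∈ Finset.Icc i (PySem.Int.floordiv x (PySem.Int.floordiv x i)),
                PySem.Int.floordiv x i * a ^ 2 := Finset.mul_sum _ _ _
          _ = ∑ a ∈ Finset.Icc i (PySem.Int.floordiv x (PySem.Int.floordiv x i)),
                a ^ 2 * (x / a) := by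
              apply Finset.sum_congr rfl
              intro a ha
              rw [hconst a ha, hqe]
              ring
      rw [hblk]
      ring
    · rw [dif_neg hle]
      rw [Finset.Icc_eq_empty (by omega)]
      simp

theorem B_eq_Tsum (x : Int) (hx : 0 ≤ x) : SIGMA2_alt x = Tsum x := by
  unfold SIGMA2_alt Tsum
  rw [go_spec (x + 1 - 1).toNat x 1 0 le_rfl hx rfl]
  ring

-- ===== VERDICT (by name: the statement is the Claim_ definition above) =====
theorem SIGMA2_spec : Claim_equal_SIGMA2 := by
  intro x _ hpre
  unfold Spec_SIGMA2
  rw [A_eq_Tsum x hpre, B_eq_Tsum x hpre]
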